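-- pv_equiv track=rewrite | github.com/isagila/actions | main.py | parse_equation
-- ===== SOURCE A (Python) =====
-- def parse_equation(equation):
--     available_operations = ["+", "-", "*", "/"]
--     operation = ""
--     args = [""]
--     index = 0
--
--     for char in equation:
--         if char in available_operations:
--             operation = char
--             index += 1
--             args.append("")
--         else:
--             args[index] += char
--
--     return operation, list(filter(bool, map(str.strip, args)))
-- ===== SOURCE B (Python) =====
-- # Split-based parser: unify all four operators into one delimiter and let
-- # str.split cut the string, keeping a running "last operator seen" scan.
-- def parse_equation(equation):
--     operation = ""
--     for ch in equation:
--         if ch in "+-*/":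
--             operation = ch
--     unified = equation.replace("-", "+").replace("*", "+").replace("/", "+")
--     args = [p for p in (piece.strip() for piece in unified.split("+")) if p]
--     return operation, args
-- ===== Notes on version B (the rewrite author's own statement) =====
-- stated objective: idiomatic
-- what changed: Replaces A's manual state machine that grows args[index] by repeated string concatenation with operator unification via str.replace followed by a single str.split, plus a simple last-operator scan.
import Mathlib
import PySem

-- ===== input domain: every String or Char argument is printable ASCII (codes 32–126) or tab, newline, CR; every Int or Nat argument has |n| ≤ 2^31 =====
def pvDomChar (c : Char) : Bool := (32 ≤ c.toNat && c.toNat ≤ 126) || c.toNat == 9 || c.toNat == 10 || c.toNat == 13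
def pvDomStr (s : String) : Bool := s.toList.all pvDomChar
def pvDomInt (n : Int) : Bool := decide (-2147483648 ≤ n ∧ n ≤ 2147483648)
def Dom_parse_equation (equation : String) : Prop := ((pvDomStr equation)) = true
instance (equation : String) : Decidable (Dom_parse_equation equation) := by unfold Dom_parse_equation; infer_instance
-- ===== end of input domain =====

-- B unifies all four operators into '+' with str.replace and cuts the string with one
-- str.split, keeping a simple last-operator scan, instead of A's manual state machine
-- that grows args[index] by repeated string concatenation (objective: idiomatic).

-- ===== PORT A =====
-- A: one forward loop over the characters keeping (operation, args, index);
-- args[index] += char is in-range by construction (index = len(args)-1 always),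
-- so args.getD/args.set model it exactly.
def pvStepA (st : String × List String × Nat) (char : Char) : String × List String × Nat :=
  if char ∈ ['+', '-', '*', '/'] then
    (String.singleton char, st.2.1 ++ [""], st.2.2 + 1)
  else
    (st.1, st.2.1.set st.2.2 ((st.2.1.getD st.2.2 "") ++ String.singleton char), st.2.2)

def parse_equation (equation : String) : String × List String :=
  let st := equation.toList.foldl pvStepA ("", [""], 0)
  (st.1, (st.2.1.map PySem.Str.strip).filter (fun s => s ≠ ""))

-- ===== PORT B =====
def parse_equation_alt (equation : String) : String × List String :=
  -- "for ch in equation: if ch in '+-*/': operation = ch"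
  let operation := equation.toList.foldl
    (fun o c => if c ∈ ['+', '-', '*', '/'] then String.singleton c else o) ""
  -- equation.replace("-","+").replace("*","+").replace("/","+")
  let unified := PySem.Str.replace (PySem.Str.replace (PySem.Str.replace equation "-" "+") "*" "+") "/" "+"
  -- unified.split("+"): separator is nonempty, so Python split is Chars.splitOn
  let pieces := (PySem.Chars.splitOn unified.toList ['+']).map String.ofList
  (operation, (pieces.map PySem.Str.strip).filter (fun s => s ≠ ""))

-- ===== PRECONDITION & SPEC =====
def Spec_parse_equation (equation : String) (out : String × List String) : Prop := out = parse_equation_alt equation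
instance (equation : String) (out : String × List String) : Decidable (Spec_parse_equation equation out) := by unfold Spec_parse_equation; infer_instance

-- ===== CLAIM =====
def Claim_equal_parse_equation : Prop := ∀ (equation : String), Dom_parse_equation equation → Spec_parse_equation equation (parse_equation equation)

-- ===== LEMMAS AND PROOFS =====

-- splitting into pieces as a structural recursion (proof-side bridge between the two sides)
def pvPieces : List Char → List String
  | [] => [""]
  | head :: rest =>
    let tail := pvPieces rest
    if head ∈ ['+', '-', '*', '/'] then "" :: tail
    else (String.singleton head ++ tail.headD "") :: tail.tail

-- merge a prefix string into the first piece
def pvPrepend (s : String) : List String → List String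
  | [] => [s]
  | p :: ps => (s ++ p) :: ps

theorem pvPieces_ne_nil (cs : List Char) : pvPieces cs ≠ [] := by
  cases cs with
  | nil => simp [pvPieces]
  | cons c rest => simp only [pvPieces]; split <;> simp

theorem pvPrepend_empty (ps : List String) (h : ps ≠ []) : pvPrepend "" ps = ps := by
  cases ps with
  | nil => exact absurd rfl h
  | cons p ps => simp [pvPrepend]

-- the A-side fold, with explicit accumulator shape (op, init ++ [cur], init.length)
theorem pvKey (cs : List Char) : ∀ (op : String) (init : List String) (cur : String),
    cs.foldl pvStepA (op, init ++ [cur], init.length) =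
      (cs.foldl (fun o c => if c ∈ ['+', '-', '*', '/'] then String.singleton c else o) op,
       init ++ pvPrepend cur (pvPieces cs),
       init.length + (pvPieces cs).length - 1) := by
  induction cs with
  | nil => intro op init cur; simp [pvPieces, pvPrepend]
  | cons c rest ih =>
    intro op init cur
    have hne := pvPieces_ne_nil rest
    by_cases hc : c ∈ ['+', '-', '*', '/']
    · have h1 : pvStepA (op, init ++ [cur], init.length) c
          = (String.singleton c, (init ++ [cur]) ++ [""], (init ++ [cur]).length) := by
        simp [pvStepA, hc]
      rw [List.foldl_cons, h1, ih]
      cases hp : pvPieces rest with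
      | nil => exact absurd hp hne
      | cons p ps =>
        simp only [pvPieces, if_pos hc, hp, pvPrepend, List.append_assoc, List.singleton_append,
          List.length_cons, List.length_append, Prod.mk.injEq, String.append_empty,
          String.empty_append, List.foldl_cons]
        exact ⟨trivial, trivial, by simp only [List.length_nil]; omega⟩
    · have hget : (init ++ [cur]).getD init.length "" = cur := by simp
      have hset : (init ++ [cur]).set init.length (cur ++ String.singleton c)
          = init ++ [cur ++ String.singleton c] := by
        rw [List.set_append_right _ _ (le_refl _)]
        simp
      have h1 : pvStepA (op, init ++ [cur], init.length) c
          = (op, init ++ [cur ++ String.singleton c], init.length) := by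
        simp only [pvStepA, if_neg hc]
        rw [hget, hset]
      rw [List.foldl_cons, h1, ih]
      cases hp : pvPieces rest with
      | nil => exact absurd hp hne
      | cons p ps =>
        have hs : (cur ++ String.singleton c) ++ p = cur ++ (String.singleton c ++ p) := by
          have h2 : ((cur ++ String.singleton c) ++ p).toList
              = (cur ++ (String.singleton c ++ p)).toList := by simp
          exact String.toList_inj.mp h2
        simp only [pvPieces, if_neg hc, hp, pvPrepend, List.headD_cons, List.tail_cons,
          List.length_cons, List.foldl_cons, hs]

-- replace with a single-char pattern is a pointwise map
theorem pvReplGo (o n : Char) (l acc : List Char) (fuel : Nat) (h : l.length ≤ fuel) :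
    PySem.Chars.replace.go [o] [n] fuel l acc
      = acc.reverse ++ l.map (fun c => if c = o then n else c) := by
  induction l generalizing fuel acc with
  | nil => cases fuel <;> simp [PySem.Chars.replace.go]
  | cons c rest ih =>
    cases fuel with
    | zero => simp at h
    | succ f =>
      rw [PySem.Chars.replace.go]
      by_cases hc : c = o
      · have hp : [o].isPrefixOf (c :: rest) = true := by simp [List.isPrefixOf, hc]
        simp only [hp, if_true, List.length_singleton, List.drop_succ_cons, List.drop_zero]
        rw [ih _ _ (by simpa using h)]
        simp [hc]
      · have hp : [o].isPrefixOf (c :: rest) = false := by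
          simp only [List.isPrefixOf, Bool.and_true, beq_eq_false_iff_ne]
          exact fun h' => hc h'.symm
        simp only [hp, Bool.false_eq_true, if_false]
        rw [ih _ _ (by simpa using h)]
        simp [hc]

theorem pvReplSingle (o n : Char) (l : List Char) :
    PySem.Chars.replace l [o] [n] = l.map (fun c => if c = o then n else c) := by
  unfold PySem.Chars.replace
  simp only [List.isEmpty_cons, Bool.false_eq_true, if_false]
  simpa using pvReplGo o n l [] l.length le_rfl

-- character-level split on '+'
def pvSplitC : List Char → List (List Char)
  | [] => [[]]
  | c :: r => if c = '+' then [] :: pvSplitC r else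
      match pvSplitC r with
      | [] => [[c]]
      | h :: t => (c :: h) :: t

theorem pvSplitC_ne_nil (l : List Char) : pvSplitC l ≠ [] := by
  cases l with
  | nil => simp [pvSplitC]
  | cons c r => simp only [pvSplitC]; split; · simp
                · split <;> simp

theorem pvSplitGo (l cur : List Char) (acc : List (List Char)) (fuel : Nat)
    (h : l.length ≤ fuel) :
    PySem.Chars.splitOn.go ['+'] fuel l cur acc
      = acc.reverse ++ (match pvSplitC l with
          | [] => [cur.reverse]
          | h :: t => (cur.reverse ++ h) :: t) := by
  induction l generalizing fuel cur acc with
  | nil => cases fuel <;> simp [PySem.Chars.splitOn.go, pvSplitC]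
  | cons c rest ih =>
    cases fuel with
    | zero => simp at h
    | succ f =>
      rw [PySem.Chars.splitOn.go]
      by_cases hc : c = '+'
      · have hp : ['+'].isPrefixOf (c :: rest) = true := by simp [List.isPrefixOf, hc]
        simp only [hp, if_true, List.length_singleton, List.drop_succ_cons, List.drop_zero]
        rw [ih _ _ _ (by simpa using h)]
        rcases hs : pvSplitC rest with _ | ⟨p, ps⟩
        · exact absurd hs (pvSplitC_ne_nil rest)
        · simp [pvSplitC, hc, hs]
      · have hp : ['+'].isPrefixOf (c :: rest) = false := by
          simp only [List.isPrefixOf, Bool.and_true, beq_eq_false_iff_ne]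
          exact fun h' => hc h'.symm
        simp only [hp, Bool.false_eq_true, if_false]
        rw [ih _ _ _ (by simpa using h)]
        rcases hs : pvSplitC rest with _ | ⟨p, ps⟩
        · exact absurd hs (pvSplitC_ne_nil rest)
        · simp [pvSplitC, hc, hs]

theorem pvSplitOnPlus (l : List Char) : PySem.Chars.splitOn l ['+'] = pvSplitC l := by
  unfold PySem.Chars.splitOn
  rw [pvSplitGo l [] [] (l.length + 1) (by omega)]
  rcases hs : pvSplitC l with _ | ⟨p, ps⟩
  · exact absurd hs (pvSplitC_ne_nil l)
  · simp

-- the three replaces compose to one map sending every operator to '+'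
theorem pvTripleMap (cs : List Char) :
    ((cs.map (fun c => if c = '-' then '+' else c)).map (fun c => if c = '*' then '+' else c)).map
        (fun c => if c = '/' then '+' else c)
      = cs.map (fun c => if c ∈ ['+', '-', '*', '/'] then '+' else c) := by
  simp only [List.map_map]
  apply List.map_congr_left
  intro c _
  by_cases h1 : c = '-' <;> by_cases h2 : c = '*' <;> by_cases h3 : c = '/' <;>
    simp [Function.comp, h1, h2, h3]

-- the char-level split of the unified string is exactly A's pieces
theorem pvSplitMap (cs : List Char) :
    (pvSplitC (cs.map (fun c => if c ∈ ['+', '-', '*', '/'] then '+' else c))).map String.ofList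
      = pvPieces cs := by
  induction cs with
  | nil => simp [pvSplitC, pvPieces]
  | cons c rest ih =>
    by_cases hc : c ∈ ['+', '-', '*', '/']
    · simp only [List.map_cons, if_pos hc, pvSplitC, if_true, pvPieces]
      simpa using ih
    · have hcp : c ≠ '+' := by intro h; exact hc (by simp [h])
      rcases hs : pvSplitC (rest.map (fun c => if c ∈ ['+', '-', '*', '/'] then '+' else c))
        with _ | ⟨p, ps⟩
      · exact absurd hs (pvSplitC_ne_nil _)
      · rw [hs] at ih
        simp only [List.map_cons, if_neg hc, pvSplitC, if_neg hcp, hs, List.map_cons]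
        simp only [pvPieces, if_neg hc, ← ih, List.map_cons, List.headD_cons, List.tail_cons,
          List.cons.injEq, and_true]
        apply String.toList_inj.mp
        simp

-- ===== VERDICT =====
theorem parse_equation_spec : Claim_equal_parse_equation := by
  intro equation _
  unfold Spec_parse_equation parse_equation parse_equation_alt
  have h := pvKey equation.toList "" [] ""
  simp only [List.nil_append, List.length_nil] at h
  have hu : (PySem.Str.replace (PySem.Str.replace (PySem.Str.replace equation "-" "+") "*" "+") "/" "+").toList
      = equation.toList.map (fun c => if c ∈ ['+', '-', '*', '/'] then '+' else c) := by
    simp only [PySem.Str.toList_replace]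
    have h1 : ("-" : String).toList = ['-'] := rfl
    have h2 : ("*" : String).toList = ['*'] := rfl
    have h3 : ("/" : String).toList = ['/'] := rfl
    have h4 : ("+" : String).toList = ['+'] := rfl
    rw [h1, h2, h3, h4, pvReplSingle, pvReplSingle, pvReplSingle, pvTripleMap]
  simp only [h, hu, pvSplitOnPlus, pvSplitMap, pvPrepend_empty _ (pvPieces_ne_nil _)]
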